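-- pv_equiv track=rewrite | github.com/manav-saini/Cycle-accurate-simulator-for-5-stage-CPU | plot2.py | read_data_memory_access
-- ===== SOURCE A (Python) =====
-- def read_data_memory_access(lines, total_cycles):
--     data_memory_access = []
--     clock_cycle = []
--     total_data_memory_access = []
--
--     for line in lines:
--         if "CLOCK CYCLE: " in line:
--             cycle = int(line.split(" ")[2])
--         if "Memory Accesses: " in line:
--             index = line.split(" ")
--             data_memory_access.append(int(index[2]))
--             clock_cycle.append(cycle)
--
--     for i in range(0, total_cycles + 1):
--         if i in clock_cycle:
--             index = clock_cycle.index(i)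
--             total_data_memory_access.append(data_memory_access[index])
--         else:
--             total_data_memory_access.append(0)
--
--     return total_data_memory_access, clock_cycle
-- ===== SOURCE B (Python) =====
-- def read_data_memory_access(lines, total_cycles):
--     # One parsing pass collects (cycle, accesses) pairs; the counts are then
--     # scattered into a pre-allocated array, so the per-index membership test
--     # and .index scan of the original disappear.
--     pairs = []
--     for line in lines:
--         if "CLOCK CYCLE: " in line:
--             cycle = int(line.split(" ")[2])
--         if "Memory Accesses: " in line:
--             pairs.append((cycle, int(line.split(" ")[2])))
--     total_data_memory_access = [0] * (total_cycles + 1)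
--     seen = set()
--     for c, a in pairs:
--         if c not in seen:
--             seen.add(c)
--             if 0 <= c <= total_cycles:
--                 total_data_memory_access[c] = a
--     return total_data_memory_access, [c for c, _ in pairs]
-- ===== Notes on version B (the rewrite author's own statement) =====
-- stated objective: faster
-- what changed: The per-cycle second loop with an 'i in clock_cycle' membership test and a .index scan is replaced by a single scatter pass: the parsed (cycle, accesses) pairs are written once into a pre-allocated [0]*(total_cycles+1) array, a 'seen' set keeping the first occurrence like .index does.
import Mathlib
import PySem

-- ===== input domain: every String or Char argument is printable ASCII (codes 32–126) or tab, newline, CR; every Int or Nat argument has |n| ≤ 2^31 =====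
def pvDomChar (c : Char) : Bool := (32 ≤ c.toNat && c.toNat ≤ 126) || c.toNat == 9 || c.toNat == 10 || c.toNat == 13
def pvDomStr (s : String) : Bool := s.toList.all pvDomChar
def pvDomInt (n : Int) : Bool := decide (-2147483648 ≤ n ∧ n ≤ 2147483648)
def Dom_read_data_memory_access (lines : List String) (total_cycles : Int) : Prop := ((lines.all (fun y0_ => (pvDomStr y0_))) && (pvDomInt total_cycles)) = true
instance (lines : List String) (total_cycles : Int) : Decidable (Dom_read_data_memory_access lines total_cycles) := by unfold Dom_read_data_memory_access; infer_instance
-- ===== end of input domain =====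

-- B replaces A's per-index membership test + .index scan by a single scatter of the parsed
-- (cycle, accesses) pairs into a pre-allocated array (first occurrence wins via a 'seen' set).

-- ===== PORT A =====
-- '"CLOCK CYCLE: " in line' / '"Memory Accesses: " in line'
def pvIsClock (line : String) : Bool := PySem.Str.isIn "CLOCK CYCLE: " line
def pvIsMem (line : String) : Bool := PySem.Str.isIn "Memory Accesses: " line
-- int(line.split(" ")[2]) ; none exactly where Python raises (IndexError / ValueError)
def pvField2 (line : String) : Option Int :=
  (PySem.Str.split? line " ").bind fun fs => (PySem.List.pyGet? fs 2).bind PySem.Int.ofStr?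

-- A's parsing loop body; state = (cycle (none = not yet assigned), data_memory_access, clock_cycle).
-- On the 'none' branches Python raises (excluded by Pre_); the port skips there.
def pvAStep (st : Option Int × List Int × List Int) (line : String) :
    Option Int × List Int × List Int :=
  let cyc : Option Int :=
    if pvIsClock line then
      match pvField2 line with
      | some v => some v
      | none => st.1
    else st.1
  if pvIsMem line then
    match pvField2 line, cyc with
    | some a, some c => (cyc, st.2.1 ++ [a], st.2.2 ++ [c])
    | _, _ => (cyc, st.2.1, st.2.2)
  else (cyc, st.2.1, st.2.2)

def read_data_memory_access (lines : List String) (total_cycles : Int) : List Int × List Int :=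
  let st := lines.foldl pvAStep (none, [], [])
  let data_memory_access := st.2.1
  let clock_cycle := st.2.2
  let total := (PySem.List.pyRange 0 (total_cycles + 1) 1).foldl
    (fun acc i =>
      if i ∈ clock_cycle then
        match PySem.List.index? clock_cycle i with
        | some j => acc ++ [PySem.List.pyGetD data_memory_access (j : Int) 0]
        | none => acc ++ [0]
      else acc ++ [0]) []
  (total, clock_cycle)

-- ===== PORT B =====
-- B's parsing loop body; state = (cycle, pairs); same raise points skipped (outside Pre_).
def pvBStep (st : Option Int × List (Int × Int)) (line : String) :
    Option Int × List (Int × Int) :=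
  let cyc : Option Int :=
    if pvIsClock line then
      match pvField2 line with
      | some v => some v
      | none => st.1
    else st.1
  if pvIsMem line then
    match pvField2 line, cyc with
    | some a, some c => (cyc, st.2 ++ [(c, a)])
    | _, _ => (cyc, st.2)
  else (cyc, st.2)

-- 'if c not in seen: seen.add(c); if 0 <= c <= total_cycles: total[c] = a'
def pvScatterStep (total_cycles : Int) (st : List Int × PySem.Set Int) (p : Int × Int) :
    List Int × PySem.Set Int :=
  if PySem.Set.contains st.2 p.1 then st
  else
    (if 0 ≤ p.1 ∧ p.1 ≤ total_cycles then PySem.List.pySetD st.1 p.1 p.2 else st.1,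
     PySem.Set.add st.2 p.1)

def read_data_memory_access_alt (lines : List String) (total_cycles : Int) : List Int × List Int :=
  let pairs := (lines.foldl pvBStep (none, [])).2
  let r := pairs.foldl (pvScatterStep total_cycles)
    (PySem.List.pyRepeat [0] (total_cycles + 1), PySem.Set.empty)
  (r.1, pairs.map (fun p => p.1))

-- ===== PRECONDITION & SPEC =====
-- Pre_ excludes exactly the inputs where A raises: a "CLOCK CYCLE: "/"Memory Accesses: " line whose
-- third space-separated field is missing or not an int literal (IndexError/ValueError), and a
-- "Memory Accesses: " line with no "CLOCK CYCLE: " line at or before it (NameError: 'cycle').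
def Pre_read_data_memory_access (lines : List String) (total_cycles : Int) : Prop :=
  (lines.all (fun l => !(pvIsClock l || pvIsMem l) || (pvField2 l).isSome)
    && (List.range lines.length).all (fun j =>
        !pvIsMem (lines.getD j "") ||
        (List.range (j + 1)).any (fun i => pvIsClock (lines.getD i "")))) = true
instance (lines : List String) (total_cycles : Int) : Decidable (Pre_read_data_memory_access lines total_cycles) := by unfold Pre_read_data_memory_access; infer_instance

def pvWitness_read_data_memory_access : List String × Int :=
  (["CLOCK CYCLE: 1", "Memory Accesses: 2"], 3)

def Spec_read_data_memory_access (lines : List String) (total_cycles : Int) (out : List Int × List Int) : Prop := out = read_data_memory_access_alt lines total_cycles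
instance (lines : List String) (total_cycles : Int) (out : List Int × List Int) : Decidable (Spec_read_data_memory_access lines total_cycles out) := by unfold Spec_read_data_memory_access; infer_instance

-- ===== CLAIM (what is proved, stated in full; the proofs are below) =====
def Claim_equal_read_data_memory_access : Prop := ∀ (lines : List String) (total_cycles : Int), Dom_read_data_memory_access lines total_cycles → Pre_read_data_memory_access lines total_cycles → Spec_read_data_memory_access lines total_cycles (read_data_memory_access lines total_cycles)

-- ===== LEMMAS AND PROOFS =====

-- first-match lookup that characterises both second phases
def pvLook (cc da : List Int) (i : Int) : Int :=
  match PySem.List.index? cc i with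
  | some j => da.getD j 0
  | none => 0

-- one parsing step: B's state mirrors A's (pairs = clock_cycle.zip data, equal lengths)
theorem pv_step (cyc : Option Int) (da cc : List Int) (h : cc.length = da.length) (l : String) :
    pvBStep (cyc, cc.zip da) l =
      ((pvAStep (cyc, da, cc) l).1,
        ((pvAStep (cyc, da, cc) l).2.2).zip ((pvAStep (cyc, da, cc) l).2.1)) ∧
    ((pvAStep (cyc, da, cc) l).2.2).length = ((pvAStep (cyc, da, cc) l).2.1).length := by
  unfold pvAStep pvBStep
  by_cases hk : pvIsClock l = true
  · by_cases hm : pvIsMem l = true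
    · cases hf : pvField2 l with
      | none => simp [hk, hm, h]
      | some a => simp [hk, hm, h, List.zip_append h]
    · cases hf : pvField2 l with
      | none => simp [hk, hm, h]
      | some a => simp [hk, hm, h]
  · by_cases hm : pvIsMem l = true
    · cases hf : pvField2 l with
      | none => simp [hk, hm, h]
      | some a =>
        cases cyc with
        | none => simp [hk, hm, h]
        | some c => simp [hk, hm, h, List.zip_append h]
    · simp [hk, hm, h]

-- B's parse fold mirrors A's parse fold
theorem pv_parse (lines : List String) :
    ∀ (cyc : Option Int) (da cc : List Int), cc.length = da.length →
      lines.foldl pvBStep (cyc, cc.zip da) =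
        ((lines.foldl pvAStep (cyc, da, cc)).1,
          ((lines.foldl pvAStep (cyc, da, cc)).2.2).zip ((lines.foldl pvAStep (cyc, da, cc)).2.1)) ∧
      ((lines.foldl pvAStep (cyc, da, cc)).2.2).length =
        ((lines.foldl pvAStep (cyc, da, cc)).2.1).length := by
  induction lines with
  | nil => intro cyc da cc h; exact ⟨rfl, h⟩
  | cons l ls ih =>
    intro cyc da cc h
    obtain ⟨hstep, hlen⟩ := pv_step cyc da cc h l
    simp only [List.foldl_cons, hstep]
    obtain ⟨ih1, ih2⟩ := ih (pvAStep (cyc, da, cc) l).1 (pvAStep (cyc, da, cc) l).2.1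
      (pvAStep (cyc, da, cc) l).2.2 hlen
    exact ⟨ih1, ih2⟩

-- A's second loop appends exactly pvLook at each index
theorem pv_aloop (cc da : List Int) (tc : Int) :
    (PySem.List.pyRange 0 (tc + 1) 1).foldl
      (fun acc i =>
        if i ∈ cc then
          match PySem.List.index? cc i with
          | some j => acc ++ [PySem.List.pyGetD da (j : Int) 0]
          | none => acc ++ [0]
        else acc ++ [0]) [] =
      (PySem.List.pyRange 0 (tc + 1) 1).map (pvLook cc da) := by
  have hfun : (fun (acc : List Int) (i : Int) =>
      if i ∈ cc then
        match PySem.List.index? cc i with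
        | some j => acc ++ [PySem.List.pyGetD da (j : Int) 0]
        | none => acc ++ [0]
      else acc ++ [0]) = fun acc i => acc ++ [pvLook cc da i] := by
    funext acc i
    unfold pvLook
    by_cases hi : i ∈ cc
    · rw [if_pos hi]
      cases hj : PySem.List.index? cc i with
      | none => exact absurd hi ((PySem.List.index?_eq_none_iff cc i).mp hj)
      | some j => simp [PySem.List.pyGetD_natCast]
    · rw [if_neg hi, (PySem.List.index?_eq_none_iff cc i).mpr hi]
  rw [hfun, PySem.List.foldl_append_singleton_eq_map]
  simp

-- first pair for i in cc.zip da is the .index lookup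
theorem pv_find_zip (cc : List Int) :
    ∀ (da : List Int), cc.length = da.length → ∀ i : Int,
      (match (cc.zip da).find? (fun p => p.1 == i) with
       | some p => p.2
       | none => (0 : Int)) = pvLook cc da i := by
  induction cc with
  | nil =>
    intro da h i
    unfold pvLook
    rw [(PySem.List.index?_eq_none_iff [] i).mpr (List.not_mem_nil)]
    simp
  | cons c cc' ih =>
    intro da h i
    cases da with
    | nil => simp at h
    | cons a da' =>
      simp only [List.length_cons, Nat.add_right_cancel_iff] at h
      by_cases hci : c = i
      · subst hci
        have hp : ((c, a).1 == c) = true := by simp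
        simp only [List.zip_cons_cons, List.find?_cons, hp]
        unfold pvLook
        rw [PySem.List.index?_cons_self]
        simp
      · have hp : ((c, a).1 == i) = false := by simp [hci]
        simp only [List.zip_cons_cons, List.find?_cons, hp]
        rw [ih da' h i]
        unfold pvLook
        rw [PySem.List.index?_cons_of_ne cc' hci]
        cases hx : PySem.List.index? cc' i <;> simp [hx]

-- scatter invariant: entry k holds the first pair's value for k; seen entries frozen
theorem pv_scatter (tc : Int) (ps : List (Int × Int)) :
    ∀ (total : List Int) (seen : PySem.Set Int), total.length = (tc + 1).toNat →
      (ps.foldl (pvScatterStep tc) (total, seen)).1.length = total.length ∧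
      ∀ k : Nat, k < total.length →
        PySem.List.pyGetD (ps.foldl (pvScatterStep tc) (total, seen)).1 (k : Int) 0 =
          if (k : Int) ∈ seen then PySem.List.pyGetD total (k : Int) 0
          else
            match ps.find? (fun p => p.1 == (k : Int)) with
            | some p => p.2
            | none => PySem.List.pyGetD total (k : Int) 0 := by
  induction ps with
  | nil =>
    intro total seen _
    refine ⟨rfl, fun k hk => ?_⟩
    simp only [List.foldl_nil, List.find?_nil]
    split <;> rfl
  | cons p ps ih =>
    intro total seen hlen
    obtain ⟨c, a⟩ := p
    simp only [List.foldl_cons]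
    by_cases hc : PySem.Set.contains seen c = true
    · have hcmem : c ∈ seen := by simpa [PySem.Set.contains] using hc
      have hstep : pvScatterStep tc (total, seen) (c, a) = (total, seen) := by
        unfold pvScatterStep
        simp only [hc, if_true]
      rw [hstep]
      obtain ⟨ih1, ih2⟩ := ih total seen hlen
      refine ⟨ih1, fun k hk => ?_⟩
      rw [ih2 k hk]
      by_cases hks : (k : Int) ∈ seen
      · rw [if_pos hks, if_pos hks]
      · have hck : ((c, a).1 == (k : Int)) = false := by
          simp only [beq_eq_false_iff_ne]
          intro hh
          exact hks (hh ▸ hcmem)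
        rw [if_neg hks, if_neg hks, List.find?_cons, hck]
    · have hcf : PySem.Set.contains seen c = false := by simpa using hc
      have hcmem : c ∉ seen := by
        intro hmem
        exact hc (by simpa [PySem.Set.contains] using hmem)
      have hstep : pvScatterStep tc (total, seen) (c, a) =
          ((if 0 ≤ c ∧ c ≤ tc then PySem.List.pySetD total c a else total),
            PySem.Set.add seen c) := by
        unfold pvScatterStep
        simp only [hcf, Bool.false_eq_true, if_false]
      rw [hstep]
      set total' := (if 0 ≤ c ∧ c ≤ tc then PySem.List.pySetD total c a else total) with htot
      have hlen' : total'.length = (tc + 1).toNat := by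
        rw [htot]; split
        · rw [PySem.List.length_pySetD]; exact hlen
        · exact hlen
      obtain ⟨ih1, ih2⟩ := ih total' (PySem.Set.add seen c) hlen'
      have hlen'' : total'.length = total.length := by rw [hlen', hlen]
      refine ⟨by rw [ih1, hlen''], fun k hk => ?_⟩
      rw [ih2 k (by rw [hlen'']; exact hk)]
      by_cases hkc : (k : Int) = c
      · -- first write wins: k was unseen, c = k is in range, the cell is set to a
        have hk_seen' : (k : Int) ∈ PySem.Set.add seen c := by
          rw [PySem.Set.mem_add]; exact Or.inr hkc
        have hk_not : (k : Int) ∉ seen := by rw [hkc]; exact hcmem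
        have hrange : 0 ≤ c ∧ c ≤ tc := by
          constructor
          · rw [← hkc]; exact Int.natCast_nonneg k
          · have : (k : Int) < ((tc + 1).toNat : Int) := by exact_mod_cast hlen ▸ hk
            omega
        have hcnat : c = ((c.toNat : Nat) : Int) := by omega
        have hget : PySem.List.pyGetD total' (k : Int) 0 = a := by
          rw [htot, if_pos hrange, hcnat, PySem.List.pyGetD_pySetD_natCast total c.toNat k a 0
            (by omega)]
          rw [if_pos (by omega)]
        rw [if_pos hk_seen', hget, if_neg hk_not]
        have hck : ((c, a).1 == (k : Int)) = true := by simp [hkc]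
        rw [List.find?_cons, hck]
      · have hseen_iff : ((k : Int) ∈ PySem.Set.add seen c) ↔ ((k : Int) ∈ seen) := by
          rw [PySem.Set.mem_add]
          constructor
          · rintro (hh | hh)
            · exact hh
            · exact absurd hh hkc
          · exact Or.inl
        have hget : PySem.List.pyGetD total' (k : Int) 0 = PySem.List.pyGetD total (k : Int) 0 := by
          rw [htot]; split
          · next hr =>
            have hcnat : c = ((c.toNat : Nat) : Int) := by omega
            rw [hcnat, PySem.List.pyGetD_pySetD_natCast total c.toNat k a 0 (by omega)]
            rw [if_neg (by omega)]
          · rfl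
        have hck : ((c, a).1 == (k : Int)) = false := by
          simp only [beq_eq_false_iff_ne]
          exact fun hh => hkc hh.symm
        rw [List.find?_cons, hck]
        by_cases hks : (k : Int) ∈ seen
        · rw [if_pos (hseen_iff.mpr hks), if_pos hks, hget]
        · rw [if_neg (fun hh => hks (hseen_iff.mp hh)), if_neg hks]
          cases (ps.find? (fun p => p.1 == (k : Int))) <;> simp [hget]

theorem pv_main (lines : List String) (tc : Int) :
    read_data_memory_access lines tc = read_data_memory_access_alt lines tc := by
  obtain ⟨hB, hlen⟩ := pv_parse lines none [] [] rfl
  unfold read_data_memory_access read_data_memory_access_alt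
  simp only []
  set A := lines.foldl pvAStep (none, [], []) with hA
  set cc := A.2.2
  set da := A.2.1
  have hB' : (lines.foldl pvBStep (none, [])).2 = cc.zip da := by
    rw [show ((none : Option Int), ([] : List (Int × Int))) =
      ((none : Option Int), ([] : List Int).zip ([] : List Int)) from rfl, hB]
  rw [hB']
  have hccda : cc.length = da.length := hlen
  refine Prod.ext ?_ ?_
  · -- first components: A's range loop = B's scatter
    simp only []
    rw [pv_aloop cc da tc, PySem.List.pyRepeat_singleton]
    set N := (tc + 1).toNat with hN
    obtain ⟨hslen, hsget⟩ := pv_scatter tc (cc.zip da) (List.replicate N 0) PySem.Set.empty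
      (by simp [hN])
    set r := ((cc.zip da).foldl (pvScatterStep tc) (List.replicate N 0, PySem.Set.empty)).1
      with hr
    have hrlen : r.length = N := by simpa using hslen
    have hrange : PySem.List.pyRange 0 (tc + 1) 1 =
        List.map (fun k : Nat => (k : Int)) (List.range N) := by
      by_cases hpos : 0 ≤ tc + 1
      · have h1 : tc + 1 = ((N : Nat) : Int) := by omega
        rw [h1]
        exact PySem.List.pyRange_zero_natCast N
      · have hN0 : N = 0 := by omega
        have hnil : PySem.List.pyRange 0 (tc + 1) 1 = [] := by
          simp [PySem.List.pyRange]; omega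
        rw [hnil, hN0]
        rfl
    rw [hrange, List.map_map]
    refine List.ext_getElem (by simp [hrlen]) ?_
    intro k h1 h2
    have hkN : k < N := by
      rw [hrlen] at h2
      exact h2
    have hget := hsget k (by simpa using hkN)
    have hnotmem : ¬ ((k : Int) ∈ (PySem.Set.empty : PySem.Set Int)) := by
      simp [PySem.Set.empty]
    rw [if_neg hnotmem] at hget
    have hrepl : PySem.List.pyGetD (List.replicate N (0 : Int)) (k : Int) 0 = 0 := by
      rw [PySem.List.pyGetD_natCast]
      simp
    have hfind := pv_find_zip cc da hccda (k : Int)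
    have hBk : r[k] = pvLook cc da (k : Int) := by
      rw [PySem.List.pyGetD_natCast r k 0, List.getD_eq_getElem r 0 (by omega)] at hget
      rw [hget, ← hfind]
      cases (cc.zip da).find? (fun p => p.1 == (k : Int)) <;> simp [hrepl]
    rw [hBk]
    simp
  · -- second components: clock_cycle = pairs.map fst
    simp only []
    rw [show (fun p : Int × Int => p.1) = (Prod.fst : Int × Int → Int) from rfl,
      List.map_fst_zip (le_of_eq hccda)]

-- ===== VERDICT (by name: the statement is the Claim_ definition above) =====
theorem read_data_memory_access_spec : Claim_equal_read_data_memory_access := by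
  intro lines tc _ _
  unfold Spec_read_data_memory_access
  exact pv_main lines tc
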